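-- pv_equiv track=rewrite | github.com/yahshibu/nested-ner-tacl2020-transformers | util/evaluate.py | detail_count_overlap_b
-- ===== SOURCE A (Python) =====
-- from typing import List, Tuple
-- from collections import defaultdict
--
-- def detail_count_overlap_b(g_entities: List[List[Tuple[int, int, int]]], p_entities: List[List[Tuple[int, int, int]]]) \
--         -> Tuple[Tuple[int, int], Tuple[int, int], Tuple[int, int]]:
--     """
--     Counting the # of crossing structures
--     # of the mentions with the same boudaries
--     """
--     num_left = 0
--     num_right = 0
--     num_other = 0
--     c_num_left = 0
--     c_num_right = 0
--     c_num_other = 0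
--
--     for ets, p_ets in zip(g_entities, p_entities):
--         len_ets = len(ets)
--         if len_ets == 0:
--             continue
--
--         start_dic = defaultdict(list)
--         end_dic = defaultdict(list)
--         for e in ets:
--             start_dic[(e[0], e[2])].append(e)
--             end_dic[(e[1], e[2])].append(e)
--
--         for k, v in start_dic.items():
--             if len(v) > 1:
--                 num_left += len(v)
--                 for e in v:
--                     if e in p_ets:
--                         c_num_left += 1
--
--         for k, v in end_dic.items():
--             if len(v) > 1:
--                 num_right += len(v)
--                 for e in v:
--                     if e in p_ets:
--                         c_num_right += 1
--
--     return (num_left, c_num_left), (num_right, c_num_right), (num_other, c_num_other)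
-- ===== SOURCE B (Python) =====
-- from typing import List, Tuple
--
-- def detail_count_overlap_b(g_entities: List[List[Tuple[int, int, int]]], p_entities: List[List[Tuple[int, int, int]]]) \
--         -> Tuple[Tuple[int, int], Tuple[int, int], Tuple[int, int]]:
--     def side(ets, p_ets, key):
--         ks = [key(e) for e in ets]
--         n = sum(1 for e in ets if ks.count(key(e)) > 1)
--         c = sum(1 for e in ets if ks.count(key(e)) > 1 and e in p_ets)
--         return n, c
--     pairs = list(zip(g_entities, p_entities))
--     lefts = [side(ets, p_ets, lambda e: (e[0], e[2])) for ets, p_ets in pairs]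
--     rights = [side(ets, p_ets, lambda e: (e[1], e[2])) for ets, p_ets in pairs]
--     return (sum(n for n, _ in lefts), sum(c for _, c in lefts)), \
--            (sum(n for n, _ in rights), sum(c for _, c in rights)), (0, 0)
-- ===== Notes on version B (the rewrite author's own statement) =====
-- stated objective: alternative
-- what changed: Replaces the per-sentence dict-of-lists grouping plus nested group-then-member loops by a direct per-entity occurrence count: two comprehension passes (left/right boundary keys) counting entities whose key occurs more than once, summed over sentences.
import Mathlib
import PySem

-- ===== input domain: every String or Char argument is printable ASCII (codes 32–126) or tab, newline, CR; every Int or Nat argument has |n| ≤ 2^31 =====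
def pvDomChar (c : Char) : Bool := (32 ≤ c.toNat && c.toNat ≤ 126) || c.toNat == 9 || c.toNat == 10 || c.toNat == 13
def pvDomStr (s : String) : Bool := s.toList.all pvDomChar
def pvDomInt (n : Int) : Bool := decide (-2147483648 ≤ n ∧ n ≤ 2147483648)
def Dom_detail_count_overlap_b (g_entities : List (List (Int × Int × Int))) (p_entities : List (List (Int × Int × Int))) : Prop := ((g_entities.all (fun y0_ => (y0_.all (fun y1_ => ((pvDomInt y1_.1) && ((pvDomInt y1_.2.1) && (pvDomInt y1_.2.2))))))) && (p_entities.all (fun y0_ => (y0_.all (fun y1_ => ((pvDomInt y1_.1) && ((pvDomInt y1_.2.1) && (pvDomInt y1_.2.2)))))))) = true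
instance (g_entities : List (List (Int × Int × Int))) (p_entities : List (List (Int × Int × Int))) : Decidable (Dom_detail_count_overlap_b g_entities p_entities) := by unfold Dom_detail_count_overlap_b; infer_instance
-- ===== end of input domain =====

-- ===== PORT A =====
-- B replaces A's per-sentence dict-of-lists grouping and nested group loops by a direct
-- per-entity boundary-key occurrence count, two comprehension passes summed over sentences (alternative).
def detail_count_overlap_b (g_entities : List (List (Int × Int × Int))) (p_entities : List (List (Int × Int × Int))) : (Int × Int) × (Int × Int) × (Int × Int) :=
  -- state = (num_left, c_num_left, num_right, c_num_right); num_other/c_num_other stay 0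
  let st := (g_entities.zip p_entities).foldl (fun st pr =>
    let ets := pr.1
    let p_ets := pr.2
    if ets.length = 0 then st
    else
      let start_dic := ets.foldl (fun d e => d.modify (e.1, e.2.2) [] (fun v => v ++ [e])) PySem.Dict.empty
      let end_dic := ets.foldl (fun d e => d.modify (e.2.1, e.2.2) [] (fun v => v ++ [e])) PySem.Dict.empty
      let st1 := start_dic.items.foldl (fun s kv =>
          if 1 < kv.2.length then
            (s.1 + (kv.2.length : Int),
             kv.2.foldl (fun c e => if e ∈ p_ets then c + 1 else c) s.2.1,
             s.2.2)
          else s) st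
      let st2 := end_dic.items.foldl (fun s kv =>
          if 1 < kv.2.length then
            (s.1, s.2.1,
             s.2.2.1 + (kv.2.length : Int),
             kv.2.foldl (fun c e => if e ∈ p_ets then c + 1 else c) s.2.2.2)
          else s) st1
      st2) ((0 : Int), (0 : Int), (0 : Int), (0 : Int))
  ((st.1, st.2.1), (st.2.2.1, st.2.2.2), ((0 : Int), (0 : Int)))

-- ===== PORT B =====
-- helper 'side' of Source B: per-sentence (n, c) for one boundary key
def pvSide (ets p_ets : List (Int × Int × Int)) (key : Int × Int × Int → Int × Int) : Int × Int :=
  let ks := ets.map key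
  ((ets.countP (fun e => decide (1 < ks.count (key e))) : Int),
   (ets.countP (fun e => decide (1 < ks.count (key e)) && decide (e ∈ p_ets)) : Int))

def detail_count_overlap_b_alt (g_entities : List (List (Int × Int × Int))) (p_entities : List (List (Int × Int × Int))) : (Int × Int) × (Int × Int) × (Int × Int) :=
  let pairs := g_entities.zip p_entities
  let lefts := pairs.map (fun pr => pvSide pr.1 pr.2 (fun e => (e.1, e.2.2)))
  let rights := pairs.map (fun pr => pvSide pr.1 pr.2 (fun e => (e.2.1, e.2.2)))
  (((lefts.map Prod.fst).sum, (lefts.map Prod.snd).sum),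
   ((rights.map Prod.fst).sum, (rights.map Prod.snd).sum),
   ((0 : Int), (0 : Int)))

-- ===== PRECONDITION & SPEC =====
def Spec_detail_count_overlap_b (g_entities : List (List (Int × Int × Int))) (p_entities : List (List (Int × Int × Int))) (out : (Int × Int) × (Int × Int) × (Int × Int)) : Prop := out = detail_count_overlap_b_alt g_entities p_entities
instance (g_entities : List (List (Int × Int × Int))) (p_entities : List (List (Int × Int × Int))) (out : (Int × Int) × (Int × Int) × (Int × Int)) : Decidable (Spec_detail_count_overlap_b g_entities p_entities out) := by unfold Spec_detail_count_overlap_b; infer_instance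

-- ===== CLAIM (what is proved, stated in full; the proofs are below) =====
def Claim_equal_detail_count_overlap_b : Prop := ∀ (g_entities : List (List (Int × Int × Int))) (p_entities : List (List (Int × Int × Int))), Dom_detail_count_overlap_b g_entities p_entities → Spec_detail_count_overlap_b g_entities p_entities (detail_count_overlap_b g_entities p_entities)

-- ===== LEMMAS AND PROOFS =====

lemma pv_sum_swap {α β : Type} (ks : List β) (ets : List α) (h : β → α → Int) :
    (ks.map (fun k => (ets.map (h k)).sum)).sum
      = (ets.map (fun e => (ks.map (fun k => h k e)).sum)).sum := by
  induction ks with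
  | nil => simp
  | cons k ks ih =>
      simp only [List.map_cons, List.sum_cons, ih]
      rw [← PySem.List.sum_map_add_int]

lemma pv_sum_single {β : Type} [DecidableEq β] (ks : List β) (x : β) (g : Int)
    (hnd : ks.Nodup) (hx : x ∈ ks) :
    (ks.map (fun k => if x = k then g else 0)).sum = g := by
  induction ks with
  | nil => cases hx
  | cons k ks ih =>
      simp only [List.map_cons, List.sum_cons]
      rcases List.mem_cons.mp hx with h | h
      · subst h
        have hnot : x ∉ ks := (List.nodup_cons.mp hnd).1
        have hz : (ks.map (fun k => if x = k then g else 0)).sum = 0 := by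
          rw [List.map_congr_left (g := fun _ => (0:Int))
            (fun a ha => if_neg (fun he : x = a => hnot (he ▸ ha))),
            PySem.List.sum_map_const_int]
          ring
        rw [hz]; simp
      · have hne : x ≠ k := fun he => ((List.nodup_cons.mp hnd).1 (he ▸ h))
        rw [if_neg hne, ih (List.nodup_cons.mp hnd).2 h]; ring

lemma pv_sum_filter {α : Type} (l : List α) (p : α → Prop) [DecidablePred p] (g : α → Int) :
    ((l.filter (fun e => decide (p e))).map g).sum
      = (l.map (fun e => if p e then g e else 0)).sum := by
  induction l with
  | nil => simp
  | cons a l ih =>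
      by_cases h : p a <;> simp [h, ih]

lemma pv_group_sum {α β : Type} [BEq β] [LawfulBEq β] [DecidableEq β] (ets : List α) (lk : α → β) (g : α → Int) :
    ((PySem.Set.ofList (ets.map lk)).map
        (fun k => ((ets.filter (fun e => decide (lk e = k))).map g).sum)).sum
      = (ets.map g).sum := by
  have h1 : ∀ k, ((ets.filter (fun e => decide (lk e = k))).map g).sum
      = (ets.map (fun e => if lk e = k then g e else 0)).sum := by
    intro k; exact pv_sum_filter ets (fun e => lk e = k) g
  calc ((PySem.Set.ofList (ets.map lk)).map
        (fun k => ((ets.filter (fun e => decide (lk e = k))).map g).sum)).sum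
      = ((PySem.Set.ofList (ets.map lk)).map
        (fun k => (ets.map (fun e => if lk e = k then g e else 0)).sum)).sum := by
        exact congrArg _ (List.map_congr_left (fun k _ => h1 k))
    _ = (ets.map (fun e => ((PySem.Set.ofList (ets.map lk)).map
          (fun k => if lk e = k then g e else 0)).sum)).sum :=
        pv_sum_swap _ ets (fun k e => if lk e = k then g e else 0)
    _ = (ets.map g).sum := by
        refine congrArg _ (List.map_congr_left ?_)
        intro e he
        exact pv_sum_single _ (lk e) (g e) (PySem.Set.nodup_ofList _)
          ((PySem.Set.mem_ofList _ _).mpr (List.mem_map_of_mem he))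

lemma pv_group_sum_if {α β : Type} [BEq β] [LawfulBEq β] [DecidableEq β] (ets : List α) (lk : α → β)
    (P : β → Prop) [DecidablePred P] (w : α → Int) :
    ((PySem.Set.ofList (ets.map lk)).map
        (fun k => if P k then ((ets.filter (fun e => decide (lk e = k))).map w).sum else 0)).sum
      = (ets.map (fun e => if P (lk e) then w e else 0)).sum := by
  rw [← pv_group_sum ets lk (fun e => if P (lk e) then w e else 0)]
  refine congrArg _ (List.map_congr_left ?_)
  intro k _
  have : ((ets.filter (fun e => decide (lk e = k))).map (fun e => if P (lk e) then w e else 0))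
      = ((ets.filter (fun e => decide (lk e = k))).map (fun e => if P k then w e else 0)) := by
    refine List.map_congr_left ?_
    intro e he
    have : lk e = k := by simpa using (List.mem_filter.mp he).2
    rw [this]
  rw [this]
  by_cases h : P k
  · simp [h]
  · simp [h]

lemma pv_sum_ite_one {α : Type} (l : List α) (p : α → Prop) [DecidablePred p] :
    (l.map (fun e => if p e then (1:Int) else 0)).sum = (l.countP (fun e => decide (p e)) : Int) := by
  induction l with
  | nil => simp
  | cons a l ih => by_cases h : p a <;> simp [h, ih, add_comm]

lemma pv_items_fold_left (l : List ((Int × Int) × List (Int × Int × Int)))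
    (pets : List (Int × Int × Int)) (st : Int × Int × Int × Int) :
    l.foldl (fun s kv =>
        if 1 < kv.2.length then
          (s.1 + (kv.2.length : Int),
           kv.2.foldl (fun c e => if e ∈ pets then c + 1 else c) s.2.1,
           s.2.2)
        else s) st
      = (st.1 + (l.map (fun kv => if 1 < kv.2.length then (kv.2.length : Int) else 0)).sum,
         st.2.1 + (l.map (fun kv => if 1 < kv.2.length then (kv.2.countP (fun e => decide (e ∈ pets)) : Int) else 0)).sum,
         st.2.2) := by
  induction l generalizing st with
  | nil => simp
  | cons kv l ih =>
      simp only [List.foldl_cons, List.map_cons, List.sum_cons, ih]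
      by_cases h : 1 < kv.2.length
      · simp [h, PySem.List.foldl_ite_add_one (p := fun e => e ∈ pets), Prod.ext_iff]
        constructor <;> ring
      · simp [h]

lemma pv_items_fold_right (l : List ((Int × Int) × List (Int × Int × Int)))
    (pets : List (Int × Int × Int)) (st : Int × Int × Int × Int) :
    l.foldl (fun s kv =>
        if 1 < kv.2.length then
          (s.1, s.2.1,
           s.2.2.1 + (kv.2.length : Int),
           kv.2.foldl (fun c e => if e ∈ pets then c + 1 else c) s.2.2.2)
        else s) st
      = (st.1, st.2.1,
         st.2.2.1 + (l.map (fun kv => if 1 < kv.2.length then (kv.2.length : Int) else 0)).sum,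
         st.2.2.2 + (l.map (fun kv => if 1 < kv.2.length then (kv.2.countP (fun e => decide (e ∈ pets)) : Int) else 0)).sum) := by
  induction l generalizing st with
  | nil => simp
  | cons kv l ih =>
      simp only [List.foldl_cons, List.map_cons, List.sum_cons, ih]
      by_cases h : 1 < kv.2.length
      · simp [h, PySem.List.foldl_ite_add_one (p := fun e => e ∈ pets), Prod.ext_iff]
        constructor <;> ring
      · simp [h]

lemma pv_len_count {α β : Type} [BEq β] [LawfulBEq β] [DecidableEq β] (ets : List α) (lk : α → β) (k : β) :
    (ets.filter (fun e => decide (lk e = k))).length = (ets.map lk).count k := by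
  rw [List.count, List.countP_map, ← List.countP_eq_length_filter]
  exact List.countP_congr (fun a _ => by simp [Function.comp])

lemma pv_dic_items (ets : List (Int × Int × Int)) (lk : Int × Int × Int → Int × Int) :
    (ets.foldl (fun d e => d.modify (lk e) [] (fun v => v ++ [e])) PySem.Dict.empty).items
      = (PySem.Set.ofList (ets.map lk)).map
          (fun k => (k, ets.filter (fun e => decide (lk e = k)))) := by
  have hnd : (ets.foldl (fun d e => d.modify (lk e) [] (fun v => v ++ [e])) PySem.Dict.empty).keys.Nodup :=
    PySem.Dict.nodup_keys_foldl_modify_key ets lk [] (fun _ e v => v ++ [e]) PySem.Dict.empty (by simp)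
  have hkeys : (ets.foldl (fun d e => d.modify (lk e) [] (fun v => v ++ [e])) PySem.Dict.empty).keys
      = PySem.Set.ofList (ets.map lk) := by
    rw [PySem.Dict.keys_foldl_modify_key ets lk [] (fun _ e v => v ++ [e]) PySem.Dict.empty]
    simp [PySem.Set.update, PySem.Set.ofList_eq_foldl]
  have hget : ∀ k, (ets.foldl (fun d e => d.modify (lk e) [] (fun v => v ++ [e])) PySem.Dict.empty).getD k []
      = ets.filter (fun e => decide (lk e = k)) := by
    intro k
    have hm : (ets.foldl (fun d e => d.modify (lk e) [] (fun v => v ++ [e])) PySem.Dict.empty)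
        = (ets.map (fun e => (lk e, e))).foldl
            (fun d p => d.modify p.1 [] (fun v => v ++ [p.2])) PySem.Dict.empty := by
      rw [List.foldl_map]
    rw [hm, PySem.Dict.getD_foldl_modify_append]
    simp only [List.filter_map, List.map_map, PySem.Dict.getD_empty, List.nil_append]
    have : ((fun p : (Int × Int) × (Int × Int × Int) => p.1 == k) ∘ fun e => (lk e, e))
        = fun e => decide (lk e = k) := by
      funext e; rw [Bool.eq_iff_iff]; simp
    rw [this]
    exact List.map_id' _
  rw [PySem.Dict.items_eq_map_keys _ hnd [], hkeys]
  exact List.map_congr_left (fun k _ => by rw [hget k])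

lemma pv_side_num (ets : List (Int × Int × Int)) (p_ets : List (Int × Int × Int))
    (lk : Int × Int × Int → Int × Int) :
    ((PySem.Set.ofList (ets.map lk)).map
        (fun k => if 1 < (ets.filter (fun e => decide (lk e = k))).length
          then ((ets.filter (fun e => decide (lk e = k))).length : Int) else 0)).sum
      = (pvSide ets p_ets lk).1 := by
  have h1 : ((PySem.Set.ofList (ets.map lk)).map
        (fun k => if 1 < (ets.filter (fun e => decide (lk e = k))).length
          then ((ets.filter (fun e => decide (lk e = k))).length : Int) else 0)).sum
      = ((PySem.Set.ofList (ets.map lk)).map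
        (fun k => if 1 < (ets.filter (fun e => decide (lk e = k))).length
          then ((ets.filter (fun e => decide (lk e = k))).map (fun _ => (1:Int))).sum else 0)).sum := by
    refine congrArg _ (List.map_congr_left (fun k _ => ?_))
    rw [PySem.List.sum_map_const_int, mul_one]
  rw [h1]
  refine (pv_group_sum_if ets lk (fun k => 1 < (ets.filter (fun e => decide (lk e = k))).length)
        (fun _ => (1:Int))).trans ?_
  refine (pv_sum_ite_one ets (fun e => 1 < (ets.filter (fun x => decide (lk x = lk e))).length)).trans ?_
  unfold pvSide
  dsimp only
  congr 1
  refine List.countP_congr (fun e _ => ?_)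
  rw [pv_len_count ets lk (lk e)]

lemma pv_side_c (ets p_ets : List (Int × Int × Int)) (lk : Int × Int × Int → Int × Int) :
    ((PySem.Set.ofList (ets.map lk)).map
        (fun k => if 1 < (ets.filter (fun e => decide (lk e = k))).length
          then (((ets.filter (fun e => decide (lk e = k))).countP (fun e => decide (e ∈ p_ets))) : Int) else 0)).sum
      = (pvSide ets p_ets lk).2 := by
  have h1 : ((PySem.Set.ofList (ets.map lk)).map
        (fun k => if 1 < (ets.filter (fun e => decide (lk e = k))).length
          then (((ets.filter (fun e => decide (lk e = k))).countP (fun e => decide (e ∈ p_ets))) : Int) else 0)).sum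
      = ((PySem.Set.ofList (ets.map lk)).map
        (fun k => if 1 < (ets.filter (fun e => decide (lk e = k))).length
          then ((ets.filter (fun e => decide (lk e = k))).map (fun e => if e ∈ p_ets then (1:Int) else 0)).sum else 0)).sum := by
    refine congrArg _ (List.map_congr_left (fun k _ => ?_))
    rw [pv_sum_ite_one]
  rw [h1]
  refine (pv_group_sum_if ets lk (fun k => 1 < (ets.filter (fun e => decide (lk e = k))).length)
        (fun e => if e ∈ p_ets then (1:Int) else 0)).trans ?_
  have h2 : (ets.map (fun e => if 1 < (ets.filter (fun x => decide (lk x = lk e))).length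
        then (if e ∈ p_ets then (1:Int) else 0) else 0)).sum
      = (ets.map (fun e => if (1 < (ets.filter (fun x => decide (lk x = lk e))).length ∧ e ∈ p_ets)
        then (1:Int) else 0)).sum := by
    refine congrArg _ (List.map_congr_left (fun e _ => ?_))
    by_cases hl : 1 < (ets.filter (fun x => decide (lk x = lk e))).length <;>
      by_cases hm : e ∈ p_ets <;> simp [hl, hm]
  rw [h2, pv_sum_ite_one]
  unfold pvSide
  dsimp only
  congr 1
  refine List.countP_congr (fun e _ => ?_)
  rw [pv_len_count ets lk (lk e)]
  simp

lemma pv_stepA (p_ets ets : List (Int × Int × Int)) (st : Int × Int × Int × Int) :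
    (if ets.length = 0 then st
     else
       let start_dic := ets.foldl (fun d e => d.modify (e.1, e.2.2) [] (fun v => v ++ [e])) PySem.Dict.empty
       let end_dic := ets.foldl (fun d e => d.modify (e.2.1, e.2.2) [] (fun v => v ++ [e])) PySem.Dict.empty
       let st1 := start_dic.items.foldl (fun s kv =>
           if 1 < kv.2.length then
             (s.1 + (kv.2.length : Int),
              kv.2.foldl (fun c e => if e ∈ p_ets then c + 1 else c) s.2.1,
              s.2.2)
           else s) st
       let st2 := end_dic.items.foldl (fun s kv =>
           if 1 < kv.2.length then
             (s.1, s.2.1,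
              s.2.2.1 + (kv.2.length : Int),
              kv.2.foldl (fun c e => if e ∈ p_ets then c + 1 else c) s.2.2.2)
           else s) st1
       st2)
    = (st.1 + (pvSide ets p_ets (fun e => (e.1, e.2.2))).1,
       st.2.1 + (pvSide ets p_ets (fun e => (e.1, e.2.2))).2,
       st.2.2.1 + (pvSide ets p_ets (fun e => (e.2.1, e.2.2))).1,
       st.2.2.2 + (pvSide ets p_ets (fun e => (e.2.1, e.2.2))).2) := by
  by_cases h : ets.length = 0
  · rw [if_pos h]
    rw [List.length_eq_zero_iff] at h
    subst h
    simp [pvSide]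
  · rw [if_neg h]
    dsimp only
    rw [pv_items_fold_left, pv_items_fold_right,
        pv_dic_items ets (fun e => (e.1, e.2.2)), pv_dic_items ets (fun e => (e.2.1, e.2.2))]
    simp only [List.map_map, Function.comp_def]
    rw [pv_side_num ets p_ets (fun e => (e.1, e.2.2)), pv_side_num ets p_ets (fun e => (e.2.1, e.2.2)),
        pv_side_c ets p_ets (fun e => (e.1, e.2.2)), pv_side_c ets p_ets (fun e => (e.2.1, e.2.2))]

lemma pv_fold_sum (l : List (List (Int × Int × Int) × List (Int × Int × Int)))
    (st : Int × Int × Int × Int) :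
    l.foldl (fun st pr =>
      let ets := pr.1
      let p_ets := pr.2
      if ets.length = 0 then st
      else
        let start_dic := ets.foldl (fun d e => d.modify (e.1, e.2.2) [] (fun v => v ++ [e])) PySem.Dict.empty
        let end_dic := ets.foldl (fun d e => d.modify (e.2.1, e.2.2) [] (fun v => v ++ [e])) PySem.Dict.empty
        let st1 := start_dic.items.foldl (fun s kv =>
            if 1 < kv.2.length then
              (s.1 + (kv.2.length : Int),
               kv.2.foldl (fun c e => if e ∈ p_ets then c + 1 else c) s.2.1,
               s.2.2)
            else s) st
        let st2 := end_dic.items.foldl (fun s kv =>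
            if 1 < kv.2.length then
              (s.1, s.2.1,
               s.2.2.1 + (kv.2.length : Int),
               kv.2.foldl (fun c e => if e ∈ p_ets then c + 1 else c) s.2.2.2)
            else s) st1
        st2) st
    = (st.1 + (l.map (fun pr => (pvSide pr.1 pr.2 (fun e => (e.1, e.2.2))).1)).sum,
       st.2.1 + (l.map (fun pr => (pvSide pr.1 pr.2 (fun e => (e.1, e.2.2))).2)).sum,
       st.2.2.1 + (l.map (fun pr => (pvSide pr.1 pr.2 (fun e => (e.2.1, e.2.2))).1)).sum,
       st.2.2.2 + (l.map (fun pr => (pvSide pr.1 pr.2 (fun e => (e.2.1, e.2.2))).2)).sum) := by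
  induction l generalizing st with
  | nil => simp
  | cons pr l ih =>
      simp only [List.foldl_cons, List.map_cons, List.sum_cons]
      rw [ih]
      rw [pv_stepA pr.2 pr.1 st]
      simp [Prod.ext_iff]
      refine ⟨by ring, by ring, by ring, by ring⟩

-- ===== VERDICT (by name: the statement is the Claim_ definition above) =====
theorem detail_count_overlap_b_spec : Claim_equal_detail_count_overlap_b := by
  intro g_entities p_entities _
  unfold Spec_detail_count_overlap_b
  unfold detail_count_overlap_b detail_count_overlap_b_alt
  dsimp only
  rw [pv_fold_sum]
  simp [List.map_map, Function.comp_def]
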